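-- pv_equiv track=rewrite | github.com/CodingThrust/problem-reductions | docs/paper/verify-reductions/adversary_partition_into_cliques_minimum_covering_by_cliques.py | is_feasible_target
-- ===== SOURCE A (Python) =====
-- def is_feasible_target(num_vertices, edges, num_cliques, edge_config):
--     """Check if edge_config is a valid covering by <= num_cliques cliques."""
--     if len(edge_config) != len(edges):
--         return False
--     if len(edges) == 0:
--         return True
--     if any(g < 0 for g in edge_config):
--         return False
--     max_group = max(edge_config)
--     if max_group >= num_cliques:
--         return False
--
--     adj = set()
--     for u, v in edges:
--         adj.add((min(u, v), max(u, v)))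
--
--     # For each group, collect vertices and verify clique
--     for g in range(max_group + 1):
--         vertices = set()
--         for idx, grp in enumerate(edge_config):
--             if grp == g:
--                 u, v = edges[idx]
--                 vertices.add(u)
--                 vertices.add(v)
--         verts = sorted(vertices)
--         for i in range(len(verts)):
--             for j in range(i + 1, len(verts)):
--                 a, b = min(verts[i], verts[j]), max(verts[i], verts[j])
--                 if (a, b) not in adj:
--                     return False
--     return True
-- ===== SOURCE B (Python) =====
-- def is_feasible_target(num_vertices, edges, num_cliques, edge_config):
--     """Check if edge_config is a valid covering by <= num_cliques cliques."""
--     if len(edge_config) != len(edges):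
--         return False
--     if len(edges) == 0:
--         return True
--     if any(g < 0 for g in edge_config):
--         return False
--     if max(edge_config) >= num_cliques:
--         return False
--
--     # Per-vertex adjacency sets (both directions), one pass over edges.
--     adj = {}
--     for u, v in edges:
--         adj.setdefault(u, set()).add(v)
--         adj.setdefault(v, set()).add(u)
--
--     # Group the endpoints per clique group, one pass over the config.
--     groups = {}
--     for g, (u, v) in zip(edge_config, edges):
--         s = groups.setdefault(g, set())
--         s.add(u)
--         s.add(v)
--
--     # Each group's vertex set must be a clique: every other group member
--     # is a neighbour of each member.
--     for verts in groups.values():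
--         for x in verts:
--             if not (verts - {x}) <= adj[x]:
--                 return False
--     return True
-- ===== Notes on version B (the rewrite author's own statement) =====
-- stated objective: idiomatic
-- what changed: Replaces the per-group scan over range(max_group+1) plus enumeration of all sorted-vertex index pairs looked up in a global normalized-edge set by a per-vertex adjacency dict and a one-pass grouping dict, verifying each group's vertex set as a clique via set-subset tests (V - {x} <= adj[x]).
import Mathlib
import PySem

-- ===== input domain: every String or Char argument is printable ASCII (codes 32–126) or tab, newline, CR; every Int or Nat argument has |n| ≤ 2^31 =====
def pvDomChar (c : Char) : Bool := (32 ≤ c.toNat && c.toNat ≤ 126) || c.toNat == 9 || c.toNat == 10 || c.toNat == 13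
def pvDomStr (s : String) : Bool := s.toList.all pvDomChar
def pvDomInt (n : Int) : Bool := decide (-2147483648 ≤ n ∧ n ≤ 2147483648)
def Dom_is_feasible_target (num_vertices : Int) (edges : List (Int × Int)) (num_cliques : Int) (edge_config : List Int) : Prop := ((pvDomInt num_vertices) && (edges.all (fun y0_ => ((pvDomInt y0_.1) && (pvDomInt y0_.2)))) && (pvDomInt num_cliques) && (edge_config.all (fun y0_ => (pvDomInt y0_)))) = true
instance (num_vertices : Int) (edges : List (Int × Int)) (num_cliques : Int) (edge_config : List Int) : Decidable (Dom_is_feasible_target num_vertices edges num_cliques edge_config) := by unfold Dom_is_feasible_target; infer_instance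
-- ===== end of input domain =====

-- B replaces A's range(max_group+1) group scan and i<j pair enumeration over sorted
-- vertices (looked up in a global normalized-edge set) by a per-vertex adjacency dict
-- and one-pass grouping dict, checking each group via set-subset tests (idiomatic).

-- ===== PORT A =====
def is_feasible_target (num_vertices : Int) (edges : List (Int × Int)) (num_cliques : Int) (edge_config : List Int) : Bool :=
  if edge_config.length ≠ edges.length then false
  else if edges.length = 0 then true
  else if edge_config.any (fun g => decide (g < 0)) then false
  else
    match PySem.List.max? edge_config (fun x => x) with
    | none => false   -- unreachable: edge_config is nonempty here
    | some max_group =>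
      if max_group ≥ num_cliques then false
      else
        let adj : PySem.Set (Int × Int) :=
          edges.foldl (fun s uv => PySem.Set.add s (min uv.1 uv.2, max uv.1 uv.2)) PySem.Set.empty
        (PySem.List.pyRange 0 (max_group + 1) 1).all (fun g =>
          let vertices : PySem.Set Int :=
            (PySem.List.enumerate edge_config 0).foldl (fun vs p =>
              if p.2 = g then
                let uv := PySem.List.pyGetD edges p.1 (0, 0)   -- edges[idx]; always in range (lengths equal)
                PySem.Set.add (PySem.Set.add vs uv.1) uv.2
              else vs) PySem.Set.empty
          let verts := PySem.List.sorted vertices (fun x => x) false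
          (PySem.List.pyRange 0 (verts.length : Int) 1).all (fun i =>
            (PySem.List.pyRange (i + 1) (verts.length : Int) 1).all (fun j =>
              PySem.Set.contains adj
                (min (PySem.List.pyGetD verts i 0) (PySem.List.pyGetD verts j 0),
                 max (PySem.List.pyGetD verts i 0) (PySem.List.pyGetD verts j 0)))))

-- ===== PORT B =====
def is_feasible_target_alt (num_vertices : Int) (edges : List (Int × Int)) (num_cliques : Int) (edge_config : List Int) : Bool :=
  if edge_config.length ≠ edges.length then false
  else if edges.length = 0 then true
  else if edge_config.any (fun g => decide (g < 0)) then false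
  else
    match PySem.List.max? edge_config (fun x => x) with
    | none => false   -- unreachable: edge_config is nonempty here
    | some max_group =>
      if max_group ≥ num_cliques then false
      else
        let adj : PySem.Dict Int (PySem.Set Int) :=
          edges.foldl (fun d uv =>
            let d1 := d.insert uv.1 (PySem.Set.add (d.getD uv.1 PySem.Set.empty) uv.2)
            d1.insert uv.2 (PySem.Set.add (d1.getD uv.2 PySem.Set.empty) uv.1)) PySem.Dict.empty
        let groups : PySem.Dict Int (PySem.Set Int) :=
          (List.zip edge_config edges).foldl (fun d p =>
            d.insert p.1 (PySem.Set.add (PySem.Set.add (d.getD p.1 PySem.Set.empty) p.2.1) p.2.2)) PySem.Dict.empty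
        groups.values.all (fun verts =>
          verts.all (fun x =>
            PySem.Set.issubset (PySem.Set.diff verts [x]) (adj.getD x PySem.Set.empty)))

-- ===== PRECONDITION & SPEC =====
def Spec_is_feasible_target (num_vertices : Int) (edges : List (Int × Int)) (num_cliques : Int) (edge_config : List Int) (out : Bool) : Prop := out = is_feasible_target_alt num_vertices edges num_cliques edge_config
instance (num_vertices : Int) (edges : List (Int × Int)) (num_cliques : Int) (edge_config : List Int) (out : Bool) : Decidable (Spec_is_feasible_target num_vertices edges num_cliques edge_config out) := by unfold Spec_is_feasible_target; infer_instance

-- ===== CLAIM (what is proved, stated in full; the proofs are below) =====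
def Claim_equal_is_feasible_target : Prop := ∀ (num_vertices : Int) (edges : List (Int × Int)) (num_cliques : Int) (edge_config : List Int), Dom_is_feasible_target num_vertices edges num_cliques edge_config → Spec_is_feasible_target num_vertices edges num_cliques edge_config (is_feasible_target num_vertices edges num_cliques edge_config)

-- ===== LEMMAS AND PROOFS =====

def pvIsEdge (edges : List (Int × Int)) (x y : Int) : Prop :=
  ∃ uv ∈ edges, (uv.1 = x ∧ uv.2 = y) ∨ (uv.1 = y ∧ uv.2 = x)

def pvInGroup (edges : List (Int × Int)) (edge_config : List Int) (g x : Int) : Prop :=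
  ∃ p ∈ List.zip edge_config edges, p.1 = g ∧ (x = p.2.1 ∨ x = p.2.2)

def pvGood (edges : List (Int × Int)) (edge_config : List Int) (g : Int) : Prop :=
  ∀ x y, pvInGroup edges edge_config g x → pvInGroup edges edge_config g y → x ≠ y → pvIsEdge edges x y

theorem pv_norm_eq_iff (u v x y : Int) :
    (min u v, max u v) = (min x y, max x y) ↔ (u = x ∧ v = y) ∨ (u = y ∧ v = x) := by
  constructor
  · intro h; rw [Prod.ext_iff] at h; simp only at h; omega
  · rintro (⟨rfl, rfl⟩ | ⟨rfl, rfl⟩); · rfl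
    · simp [min_comm, max_comm]

theorem pv_adjA_mem (edges : List (Int × Int)) (x y : Int) :
    ((min x y, max x y) ∈
      edges.foldl (fun s uv => PySem.Set.add s (min uv.1 uv.2, max uv.1 uv.2)) PySem.Set.empty)
      ↔ pvIsEdge edges x y := by
  rw [show (PySem.Set.empty : PySem.Set (Int × Int)) = ([] : List (Int × Int)) from rfl]
  rw [PySem.Set.mem_foldl_add]
  simp only [List.not_mem_nil, false_or, pvIsEdge]
  constructor
  · rintro ⟨uv, hm, h⟩
    exact ⟨uv, hm, ((pv_norm_eq_iff uv.1 uv.2 x y).1 h.symm)⟩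
  · rintro ⟨uv, hm, h⟩
    exact ⟨uv, hm, ((pv_norm_eq_iff uv.1 uv.2 x y).2 h).symm⟩

theorem hstep (d : PySem.Dict Int (PySem.Set Int)) (u v x y : Int) :
    (y ∈ ((d.insert u (PySem.Set.add (d.getD u PySem.Set.empty) v)).insert v
          (PySem.Set.add ((d.insert u (PySem.Set.add (d.getD u PySem.Set.empty) v)).getD v PySem.Set.empty) u)).getD x PySem.Set.empty)
        ↔ y ∈ d.getD x PySem.Set.empty ∨ (u = x ∧ v = y) ∨ (u = y ∧ v = x) := by
  by_cases h3 : u = v <;> by_cases h1 : x = u <;> by_cases h2 : x = v <;>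
    simp [PySem.Dict.getD_insert, PySem.Set.mem_add, h3, h1, h2, eq_comm] <;> tauto

theorem pvIsEdge_cons (uv : Int × Int) (es : List (Int × Int)) (x y : Int) :
    pvIsEdge (uv :: es) x y ↔ ((uv.1 = x ∧ uv.2 = y) ∨ (uv.1 = y ∧ uv.2 = x)) ∨ pvIsEdge es x y := by
  simp [pvIsEdge, List.mem_cons, or_and_right, exists_or]

theorem pv_adjB_mem (edges : List (Int × Int)) (d : PySem.Dict Int (PySem.Set Int)) (x y : Int) :
    (y ∈ (edges.foldl (fun d uv =>
            (d.insert uv.1 (PySem.Set.add (d.getD uv.1 PySem.Set.empty) uv.2)).insert uv.2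
              (PySem.Set.add ((d.insert uv.1 (PySem.Set.add (d.getD uv.1 PySem.Set.empty) uv.2)).getD uv.2 PySem.Set.empty) uv.1)) d).getD x PySem.Set.empty)
      ↔ y ∈ d.getD x PySem.Set.empty ∨ pvIsEdge edges x y := by
  induction edges generalizing d with
  | nil => simp [pvIsEdge]
  | cons uv es ih =>
    obtain ⟨u, v⟩ := uv
    rw [List.foldl_cons, ih]
    simp only []
    rw [hstep, pvIsEdge_cons]
    tauto

theorem gstep (d : PySem.Dict Int (PySem.Set Int)) (g0 a b g y : Int) :
    (y ∈ (d.insert g0 (PySem.Set.add (PySem.Set.add (d.getD g0 PySem.Set.empty) a) b)).getD g PySem.Set.empty)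
      ↔ y ∈ d.getD g PySem.Set.empty ∨ (g0 = g ∧ (y = a ∨ y = b)) := by
  by_cases h : g = g0 <;> simp [PySem.Dict.getD_insert, PySem.Set.mem_add, h, eq_comm] <;> tauto

theorem pv_groups_mem (l : List (Int × (Int × Int))) (d : PySem.Dict Int (PySem.Set Int)) (g y : Int) :
    (y ∈ (l.foldl (fun d p =>
            d.insert p.1 (PySem.Set.add (PySem.Set.add (d.getD p.1 PySem.Set.empty) p.2.1) p.2.2)) d).getD g PySem.Set.empty)
      ↔ y ∈ d.getD g PySem.Set.empty ∨ ∃ p ∈ l, p.1 = g ∧ (y = p.2.1 ∨ y = p.2.2) := by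
  induction l generalizing d with
  | nil => simp
  | cons p ps ih =>
    rw [List.foldl_cons, ih, gstep]
    simp only [List.mem_cons, or_and_right, exists_or, exists_eq_left]
    simp only [or_assoc]

theorem pv_vertices_mem (l : List (Int × Int)) (f : Int → Int × Int) (g : Int)
    (s : PySem.Set Int) (y : Int) :
    (y ∈ l.foldl (fun vs p =>
        if p.2 = g then PySem.Set.add (PySem.Set.add vs (f p.1).1) (f p.1).2 else vs) s)
      ↔ y ∈ s ∨ ∃ p ∈ l, p.2 = g ∧ (y = (f p.1).1 ∨ y = (f p.1).2) := by
  induction l generalizing s with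
  | nil => simp
  | cons p ps ih =>
    rw [List.foldl_cons, ih]
    by_cases h : p.2 = g <;>
      simp only [h, if_pos, List.mem_cons, or_and_right, exists_or, exists_eq_left,
        PySem.Set.mem_add, reduceIte, true_and, false_and, false_or, or_assoc]

theorem pv_vertices_nodup (l : List (Int × Int)) (f : Int → Int × Int) (g : Int)
    (s : PySem.Set Int) (hs : s.Nodup) :
    (l.foldl (fun vs p =>
        if p.2 = g then PySem.Set.add (PySem.Set.add vs (f p.1).1) (f p.1).2 else vs) s).Nodup := by
  induction l generalizing s with
  | nil => exact hs
  | cons p ps ih =>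
    rw [List.foldl_cons]
    by_cases h : p.2 = g
    · simp only [h, reduceIte]; exact ih _ (PySem.Set.nodup_add _ _ (PySem.Set.nodup_add _ _ hs))
    · simp only [h, reduceIte]; exact ih _ hs

theorem pv_pairsA_iff (adj : PySem.Set (Int × Int)) (V : PySem.Set Int) (hV : V.Nodup) :
    ((PySem.List.pyRange 0 (((PySem.List.sorted V (fun x => x) false).length : Nat) : Int) 1).all (fun i =>
      (PySem.List.pyRange (i + 1) (((PySem.List.sorted V (fun x => x) false).length : Nat) : Int) 1).all (fun j =>
        PySem.Set.contains adj
          (min (PySem.List.pyGetD (PySem.List.sorted V (fun x => x) false) i 0)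
               (PySem.List.pyGetD (PySem.List.sorted V (fun x => x) false) j 0),
           max (PySem.List.pyGetD (PySem.List.sorted V (fun x => x) false) i 0)
               (PySem.List.pyGetD (PySem.List.sorted V (fun x => x) false) j 0)))) = true)
      ↔ ∀ x ∈ V, ∀ y ∈ V, x ≠ y → (min x y, max x y) ∈ adj := by
  set verts := PySem.List.sorted V (fun x => x) false with hverts
  have hperm : verts.Perm V := PySem.List.sorted_perm V (fun x => x) false
  have hnd : verts.Nodup := (hperm.nodup_iff).mpr hV
  rw [List.all_eq_true]
  constructor
  · intro h x hx y hy hxy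
    obtain ⟨p, hp, hpx⟩ := List.mem_iff_getElem.mp (hperm.mem_iff.mpr hx)
    obtain ⟨q, hq, hqy⟩ := List.mem_iff_getElem.mp (hperm.mem_iff.mpr hy)
    have hpq : p ≠ q := by
      intro e; subst e; exact hxy (hpx.symm.trans hqy)
    have key : ∀ (a b : Nat), a < b → b < verts.length →
        (min (verts.getD a 0) (verts.getD b 0), max (verts.getD a 0) (verts.getD b 0)) ∈ adj := by
      intro a b hab hb
      have ha : a < verts.length := lt_trans hab hb
      have h1 := h (a : Int) (by
        rw [PySem.List.mem_pyRange_one]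
        exact ⟨Int.natCast_nonneg a, by exact_mod_cast ha⟩)
      rw [List.all_eq_true] at h1
      have h2 := h1 (b : Int) (by
        rw [PySem.List.mem_pyRange_one]
        exact ⟨by exact_mod_cast hab, by exact_mod_cast hb⟩)
      rw [PySem.Set.contains_iff, PySem.List.pyGetD_natCast, PySem.List.pyGetD_natCast] at h2
      exact h2
    rcases Nat.lt_or_gt_of_ne hpq with hlt | hgt
    · have := key p q hlt hq
      rwa [List.getD_eq_getElem _ _ hp, List.getD_eq_getElem _ _ hq, hpx, hqy] at this
    · have := key q p hgt hp
      rw [min_comm, max_comm] at this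
      rwa [List.getD_eq_getElem _ _ hp, List.getD_eq_getElem _ _ hq, hpx, hqy] at this
  · intro h i hi
    rw [List.all_eq_true]
    intro j hj
    rw [PySem.List.mem_pyRange_one] at hi hj
    have hij : i < j := by omega
    have h0i : 0 ≤ i := hi.1
    have h0j : 0 ≤ j := by omega
    have hpi : i.toNat < verts.length := by omega
    have hpj : j.toNat < verts.length := by omega
    have ei : i = (i.toNat : Int) := by omega
    have ej : j = (j.toNat : Int) := by omega
    rw [PySem.Set.contains_iff, ei, ej, PySem.List.pyGetD_natCast, PySem.List.pyGetD_natCast,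
      List.getD_eq_getElem _ _ hpi, List.getD_eq_getElem _ _ hpj]
    apply h
    · exact hperm.mem_iff.mp (List.getElem_mem hpi)
    · exact hperm.mem_iff.mp (List.getElem_mem hpj)
    · intro e
      have := (List.Nodup.getElem_inj_iff hnd).mp e
      omega

theorem pv_subsetB_iff (adjd : PySem.Dict Int (PySem.Set Int)) (V : PySem.Set Int) :
    ((V.all (fun x =>
        PySem.Set.issubset (PySem.Set.diff V [x]) (adjd.getD x PySem.Set.empty))) = true)
      ↔ ∀ x ∈ V, ∀ y ∈ V, y ≠ x → y ∈ adjd.getD x PySem.Set.empty := by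
  simp only [List.all_eq_true]
  constructor
  · intro h x hx y hy hyx
    have := (PySem.Set.issubset_iff _ _).mp (h x hx) y
    apply this
    simp [PySem.Set.mem_diff, hy, hyx]
  · intro h x hx
    rw [PySem.Set.issubset_iff]
    intro y hy
    rw [PySem.Set.mem_diff] at hy
    exact h x hx y hy.1 (by simpa using hy.2)

theorem pv_memA_iff (edges : List (Int × Int)) (ec : List Int)
    (hlen : ec.length = edges.length) (g y : Int) :
    (y ∈ (PySem.List.enumerate ec 0).foldl (fun vs p =>
        if p.2 = g then
          PySem.Set.add (PySem.Set.add vs (PySem.List.pyGetD edges p.1 ((0 : Int), (0 : Int))).1)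
            (PySem.List.pyGetD edges p.1 ((0 : Int), (0 : Int))).2
        else vs) PySem.Set.empty)
      ↔ pvInGroup edges ec g y := by
  rw [pv_vertices_mem (PySem.List.enumerate ec 0) (fun k => PySem.List.pyGetD edges k ((0 : Int), (0 : Int))) g]
  rw [show (PySem.Set.empty : PySem.Set Int) = ([] : List Int) from rfl]
  simp only [List.not_mem_nil, false_or]
  unfold pvInGroup
  constructor
  · rintro ⟨p, hp, hg, hy⟩
    rw [PySem.List.mem_enumerate_iff] at hp
    obtain ⟨k, hk, rfl⟩ := hp
    have hk2 : k < edges.length := by omega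
    simp only [zero_add] at hg hy
    rw [PySem.List.pyGetD_natCast, List.getD_eq_getElem _ _ hk2] at hy
    refine ⟨(ec[k], edges[k]), ?_, hg, hy⟩
    rw [List.mem_iff_getElem]
    refine ⟨k, by simp [List.length_zip]; omega, by simp [List.getElem_zip]⟩
  · rintro ⟨p, hp, h1, h2⟩
    rw [List.mem_iff_getElem] at hp
    obtain ⟨k, hk, rfl⟩ := hp
    simp only [List.length_zip] at hk
    have hk1 : k < ec.length := by omega
    have hk2 : k < edges.length := by omega
    refine ⟨((0 : Int) + (k : Nat), ec[k]), ?_, ?_, ?_⟩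
    · rw [PySem.List.mem_enumerate_iff]
      exact ⟨k, hk1, rfl⟩
    · simpa [List.getElem_zip] using h1
    · simp only [zero_add]
      rw [PySem.List.pyGetD_natCast, List.getD_eq_getElem _ _ hk2]
      simpa [List.getElem_zip] using h2

theorem pv_memB_iff (edges : List (Int × Int)) (ec : List Int) (g y : Int) :
    (y ∈ ((List.zip ec edges).foldl (fun d p =>
        d.insert p.1 (PySem.Set.add (PySem.Set.add (d.getD p.1 PySem.Set.empty) p.2.1) p.2.2))
        PySem.Dict.empty).getD g PySem.Set.empty)
      ↔ pvInGroup edges ec g y := by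
  rw [pv_groups_mem]
  simp only [PySem.Dict.getD_empty]
  rw [show (PySem.Set.empty : PySem.Set Int) = ([] : List Int) from rfl]
  simp only [List.not_mem_nil, false_or]
  rfl

theorem pv_adjB_mem' (edges : List (Int × Int)) (x y : Int) :
    (y ∈ (edges.foldl (fun d uv =>
            (d.insert uv.1 (PySem.Set.add (d.getD uv.1 PySem.Set.empty) uv.2)).insert uv.2
              (PySem.Set.add ((d.insert uv.1 (PySem.Set.add (d.getD uv.1 PySem.Set.empty) uv.2)).getD uv.2 PySem.Set.empty) uv.1))
            PySem.Dict.empty).getD x PySem.Set.empty)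
      ↔ pvIsEdge edges x y := by
  rw [pv_adjB_mem]
  simp only [PySem.Dict.getD_empty]
  rw [show (PySem.Set.empty : PySem.Set Int) = ([] : List Int) from rfl]
  simp only [List.not_mem_nil, false_or]

theorem pv_B_iff (edges : List (Int × Int)) (ec : List Int) (hlen : ec.length = edges.length) :
    ((((List.zip ec edges).foldl (fun d p =>
          d.insert p.1 (PySem.Set.add (PySem.Set.add (d.getD p.1 PySem.Set.empty) p.2.1) p.2.2))
          PySem.Dict.empty).values.all (fun verts =>
        verts.all (fun x => PySem.Set.issubset (PySem.Set.diff verts [x])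
          ((edges.foldl (fun d uv =>
            (d.insert uv.1 (PySem.Set.add (d.getD uv.1 PySem.Set.empty) uv.2)).insert uv.2
              (PySem.Set.add ((d.insert uv.1 (PySem.Set.add (d.getD uv.1 PySem.Set.empty) uv.2)).getD uv.2 PySem.Set.empty) uv.1))
              PySem.Dict.empty).getD x PySem.Set.empty)))) = true)
      ↔ ∀ g ∈ ec, pvGood edges ec g := by
  have hnd : (((List.zip ec edges).foldl (fun d p =>
      d.insert p.1 (PySem.Set.add (PySem.Set.add (d.getD p.1 PySem.Set.empty) p.2.1) p.2.2))
      PySem.Dict.empty)).keys.Nodup :=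
    PySem.Dict.nodup_keys_foldl_insert_key _ _ _ _ PySem.Dict.nodup_keys_empty
  have hkeys : (((List.zip ec edges).foldl (fun d p =>
      d.insert p.1 (PySem.Set.add (PySem.Set.add (d.getD p.1 PySem.Set.empty) p.2.1) p.2.2))
      PySem.Dict.empty)).keys = PySem.Set.ofList ec := by
    rw [PySem.Dict.keys_foldl_insert_key]
    rw [List.map_fst_zip (le_of_eq hlen)]
    rfl
  rw [PySem.Dict.values_eq_map_keys _ hnd PySem.Set.empty, List.all_map, List.all_eq_true]
  constructor
  · intro h g hg
    have hgk : g ∈ (((List.zip ec edges).foldl (fun d p =>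
        d.insert p.1 (PySem.Set.add (PySem.Set.add (d.getD p.1 PySem.Set.empty) p.2.1) p.2.2))
        PySem.Dict.empty)).keys := by
      rw [hkeys]; exact (PySem.Set.mem_ofList _ _).mpr hg
    have hc := h g hgk
    rw [Function.comp_apply, pv_subsetB_iff] at hc
    intro x y hx hy hxy
    rw [← pv_adjB_mem' edges x y]
    exact hc x ((pv_memB_iff edges ec g x).mpr hx) y ((pv_memB_iff edges ec g y).mpr hy)
      (fun e => hxy e.symm)
  · intro h g hgk
    rw [Function.comp_apply, pv_subsetB_iff]
    rw [hkeys, PySem.Set.mem_ofList] at hgk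
    intro x hx y hy hyx
    rw [pv_adjB_mem' edges x y]
    exact h g hgk x y ((pv_memB_iff edges ec g x).mp hx) ((pv_memB_iff edges ec g y).mp hy)
      (fun e => hyx e.symm)

theorem pv_notin_vacuous (edges : List (Int × Int)) (ec : List Int) (g : Int)
    (hg : g ∉ ec) : pvGood edges ec g := by
  intro x y hx hy hxy
  exfalso
  obtain ⟨p, hp, h1, _⟩ := hx
  exact hg (h1 ▸ (List.of_mem_zip hp).1)

theorem is_feasible_target_spec : Claim_equal_is_feasible_target := by
  intro num_vertices edges num_cliques edge_config _
  unfold Spec_is_feasible_target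
  by_cases h1 : edge_config.length = edges.length
  swap
  · simp [is_feasible_target, is_feasible_target_alt, h1]
  by_cases h2 : edges.length = 0
  · simp [is_feasible_target, is_feasible_target_alt, h1, h2]
  by_cases h3 : edge_config.any (fun g => decide (g < 0))
  · simp [is_feasible_target, is_feasible_target_alt, h1, h2, h3]
  cases hm : PySem.List.max? edge_config (fun x => x) with
  | none => simp [is_feasible_target, is_feasible_target_alt, h1, h2, h3, hm]
  | some mg =>
    by_cases h4 : mg ≥ num_cliques
    · simp [is_feasible_target, is_feasible_target_alt, h1, h2, h3, hm, h4]
    have hpos : ∀ g ∈ edge_config, 0 ≤ g := by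
      intro g hg
      by_contra hneg
      exact h3 (List.any_eq_true.mpr ⟨g, hg, by simpa using by omega⟩)
    have hmax : ∀ g ∈ edge_config, g ≤ mg := by
      intro g hg
      exact PySem.List.max?_isMax hm g hg
    simp only [is_feasible_target, is_feasible_target_alt, h1, h2, h3, hm, h4,
      ne_eq, not_true_eq_false, Bool.false_eq_true, if_false]
    rw [← Bool.coe_iff_coe]
    have hA : ∀ g : Int,
        (((PySem.List.pyRange 0
            (((PySem.List.sorted ((PySem.List.enumerate edge_config 0).foldl (fun vs p =>
                if p.2 = g then
                  PySem.Set.add (PySem.Set.add vs (PySem.List.pyGetD edges p.1 ((0 : Int), (0 : Int))).1)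
                    (PySem.List.pyGetD edges p.1 ((0 : Int), (0 : Int))).2
                else vs) PySem.Set.empty) (fun x => x) false).length : Nat) : Int) 1).all (fun i =>
          (PySem.List.pyRange (i + 1)
            (((PySem.List.sorted ((PySem.List.enumerate edge_config 0).foldl (fun vs p =>
                if p.2 = g then
                  PySem.Set.add (PySem.Set.add vs (PySem.List.pyGetD edges p.1 ((0 : Int), (0 : Int))).1)
                    (PySem.List.pyGetD edges p.1 ((0 : Int), (0 : Int))).2
                else vs) PySem.Set.empty) (fun x => x) false).length : Nat) : Int) 1).all (fun j =>
            PySem.Set.contains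
              (edges.foldl (fun s uv => PySem.Set.add s (min uv.1 uv.2, max uv.1 uv.2)) PySem.Set.empty)
              (min (PySem.List.pyGetD (PySem.List.sorted ((PySem.List.enumerate edge_config 0).foldl (fun vs p =>
                    if p.2 = g then
                      PySem.Set.add (PySem.Set.add vs (PySem.List.pyGetD edges p.1 ((0 : Int), (0 : Int))).1)
                        (PySem.List.pyGetD edges p.1 ((0 : Int), (0 : Int))).2
                    else vs) PySem.Set.empty) (fun x => x) false) i 0)
                   (PySem.List.pyGetD (PySem.List.sorted ((PySem.List.enumerate edge_config 0).foldl (fun vs p =>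
                    if p.2 = g then
                      PySem.Set.add (PySem.Set.add vs (PySem.List.pyGetD edges p.1 ((0 : Int), (0 : Int))).1)
                        (PySem.List.pyGetD edges p.1 ((0 : Int), (0 : Int))).2
                    else vs) PySem.Set.empty) (fun x => x) false) j 0),
               max (PySem.List.pyGetD (PySem.List.sorted ((PySem.List.enumerate edge_config 0).foldl (fun vs p =>
                    if p.2 = g then
                      PySem.Set.add (PySem.Set.add vs (PySem.List.pyGetD edges p.1 ((0 : Int), (0 : Int))).1)
                        (PySem.List.pyGetD edges p.1 ((0 : Int), (0 : Int))).2
                    else vs) PySem.Set.empty) (fun x => x) false) i 0)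
                   (PySem.List.pyGetD (PySem.List.sorted ((PySem.List.enumerate edge_config 0).foldl (fun vs p =>
                    if p.2 = g then
                      PySem.Set.add (PySem.Set.add vs (PySem.List.pyGetD edges p.1 ((0 : Int), (0 : Int))).1)
                        (PySem.List.pyGetD edges p.1 ((0 : Int), (0 : Int))).2
                    else vs) PySem.Set.empty) (fun x => x) false) j 0)))) = true)
        ↔ pvGood edges edge_config g) := by
      intro g
      rw [pv_pairsA_iff _ _ (pv_vertices_nodup (PySem.List.enumerate edge_config 0) (fun k => PySem.List.pyGetD edges k ((0 : Int), (0 : Int))) g PySem.Set.empty List.nodup_nil)]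
      unfold pvGood
      constructor
      · intro h x y hx hy hxy
        rw [← pv_adjA_mem]
        exact h x ((pv_memA_iff edges edge_config h1 g x).mpr hx)
          y ((pv_memA_iff edges edge_config h1 g y).mpr hy) hxy
      · intro h x hx y hy hxy
        rw [pv_adjA_mem]
        exact h x y ((pv_memA_iff edges edge_config h1 g x).mp hx)
          ((pv_memA_iff edges edge_config h1 g y).mp hy) hxy
    constructor
    · intro hAll
      rw [pv_B_iff edges edge_config h1]
      intro g hg
      refine (hA g).mp ?_
      refine List.all_eq_true.mp hAll g ?_
      rw [PySem.List.mem_pyRange_one]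
      refine ⟨hpos g hg, ?_⟩
      have := hmax g hg
      omega
    · intro hBall
      rw [List.all_eq_true]
      intro g hgmem
      refine (hA g).mpr ?_
      by_cases hg : g ∈ edge_config
      · exact (pv_B_iff edges edge_config h1).mp hBall g hg
      · exact pv_notin_vacuous edges edge_config g hg
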